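-- pv_equiv track=rewrite | github.com/lucper/functional-programming-python | ex12/todo.py | kanguru
-- ===== SOURCE A (Python) =====
-- def kanguru(L):
--     """Mapeia cada numero 'n' em L para '(kan)?(gu)?(ru)?' ou o proprio 'n'
--
--     Exemplos:
--     >>> kanguru([])
--     []
--
--     >>> kanguru([9, 10, 11, 21, 23, 105])
--     ['kan', 'gu', '11', 'kanru', '23', 'kanguru']
--
--     >>> kanguru(range(2, 8))
--     ['2', 'kan', '4', 'gu', 'kan', 'ru']
--
--     >>> kanguru([3, 5, 7, 15, 21, 35, 105, 2])
--     ['kan', 'gu', 'ru', 'kangu', 'kanru', 'guru', 'kanguru', '2']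
--     """
--     def num_to_str(n):
--         if n % 105 == 0:
--             return 'kanguru'
--         elif n % 35 == 0:
--             return 'guru'
--         elif n % 21 == 0:
--             return 'kanru'
--         elif n % 15 == 0:
--             return 'kangu'
--         elif n % 7 == 0:
--             return 'ru'
--         elif n % 5 == 0:
--             return 'gu'
--         elif n % 3 == 0:
--             return 'kan'
--         elif not (n % 3 == 0 and n % 5 == 0 and n % 7 == 0):
--             return str(n)
--     return [num_to_str(i) for i in L]
-- ===== SOURCE B (Python) =====
-- def kanguru(L):
--     def word(n):
--         s = ('kan' if n % 3 == 0 else '') + ('gu' if n % 5 == 0 else '') + ('ru' if n % 7 == 0 else '')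
--         return s or str(n)
--     return list(map(word, L))
-- ===== Notes on version B (the rewrite author's own statement) =====
-- stated objective: simpler
-- what changed: Replaces A's seven-branch cascade over composite moduli with three independent prime-divisor flags concatenated in kan/gu/ru order, falling back to str(n) when no flag fires.
import Mathlib
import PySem

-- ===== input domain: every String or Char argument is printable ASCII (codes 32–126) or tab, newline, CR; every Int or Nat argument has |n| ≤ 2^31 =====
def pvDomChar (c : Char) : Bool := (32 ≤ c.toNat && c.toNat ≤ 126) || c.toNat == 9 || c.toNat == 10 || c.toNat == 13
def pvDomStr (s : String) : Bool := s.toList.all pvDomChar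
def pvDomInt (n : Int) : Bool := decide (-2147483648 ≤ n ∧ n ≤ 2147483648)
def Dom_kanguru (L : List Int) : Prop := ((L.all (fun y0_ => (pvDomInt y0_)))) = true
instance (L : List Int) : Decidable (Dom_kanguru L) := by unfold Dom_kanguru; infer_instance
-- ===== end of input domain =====

-- B replaces A's seven-way composite-modulus cascade by three independent prime-divisor flags (simpler).

-- ===== PORT A =====
-- A's final 'elif not (n % 3 == 0 and n % 5 == 0 and n % 7 == 0)' is always true when reached
-- (n % 3 ≠ 0 there), so that branch is exactly 'return str(n)'.
def pvNumToStrA (n : Int) : String :=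
  if PySem.Int.mod n 105 = 0 then "kanguru"
  else if PySem.Int.mod n 35 = 0 then "guru"
  else if PySem.Int.mod n 21 = 0 then "kanru"
  else if PySem.Int.mod n 15 = 0 then "kangu"
  else if PySem.Int.mod n 7 = 0 then "ru"
  else if PySem.Int.mod n 5 = 0 then "gu"
  else if PySem.Int.mod n 3 = 0 then "kan"
  else PySem.Int.toStr n

def kanguru (L : List Int) : List String := L.map pvNumToStrA

-- ===== PORT B =====
def pvWordB (n : Int) : String :=
  let s := (if PySem.Int.mod n 3 = 0 then "kan" else "")
        ++ (if PySem.Int.mod n 5 = 0 then "gu" else "")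
        ++ (if PySem.Int.mod n 7 = 0 then "ru" else "")
  if s = "" then PySem.Int.toStr n else s

def kanguru_alt (L : List Int) : List String := L.map pvWordB

-- ===== PRECONDITION & SPEC =====
def Spec_kanguru (L : List Int) (out : List String) : Prop := out = kanguru_alt L
instance (L : List Int) (out : List String) : Decidable (Spec_kanguru L out) := by unfold Spec_kanguru; infer_instance

-- ===== CLAIM (what is proved, stated in full; the proofs are below) =====
def Claim_equal_kanguru : Prop := ∀ (L : List Int), Dom_kanguru L → Spec_kanguru L (kanguru L)

-- ===== LEMMAS AND PROOFS =====
theorem pv_key (n : Int) : pvNumToStrA n = pvWordB n := by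
  simp only [pvNumToStrA, pvWordB, PySem.Int.mod_eq_zero_iff_dvd]
  split_ifs <;> first | rfl | omega | simp_all

-- ===== VERDICT (by name: the statement is the Claim_ definition above) =====
theorem kanguru_spec : Claim_equal_kanguru := by
  intro L _
  unfold Spec_kanguru kanguru kanguru_alt
  exact List.map_congr_left fun n _ => pv_key n
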